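-- pv_equiv track=rewrite | github.com/Magnus-Fjeldstad/advent-of-code | 2025/day3/day3.py | hj
-- ===== SOURCE A (Python) =====
-- def hj(bank):
--     k = 12
--     to_romove = len(bank) - k
--     stack = []
--
--     for cell in bank:
--         while to_romove > 0 and stack and stack[-1] < cell:
--             stack.pop()
--             to_romove -= 1
--         stack.append(cell)
--
--     return "".join(stack[:k])
-- ===== SOURCE B (Python) =====
-- def _pick(w):
--     # index and value of the leftmost maximum of a non-empty list
--     bi, best = 0, w[0]
--     for j in range(1, len(w)):
--         if w[j] > best:
--             bi, best = j, w[j]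
--     return bi, best
--
--
-- def _build(cells, k):
--     # lexicographically largest length-k subsequence of cells (k <= len(cells))
--     if k == 0:
--         return []
--     i, m = _pick(cells[:len(cells) - k + 1])
--     return [m] + _build(cells[i + 1:], k - 1)
--
--
-- def hj(bank):
--     cells = list(bank)
--     k = min(len(cells), 12)
--     return "".join(_build(cells, k))
-- ===== Notes on version B (the rewrite author's own statement) =====
-- stated objective: alternative
-- what changed: Replaces the monotonic stack with a pops budget by a greedy that repeatedly scans a shrinking window for its leftmost maximum element and recurses on the suffix after it, selecting the same lexicographically largest length-min(len,12) subsequence.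
import Mathlib
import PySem

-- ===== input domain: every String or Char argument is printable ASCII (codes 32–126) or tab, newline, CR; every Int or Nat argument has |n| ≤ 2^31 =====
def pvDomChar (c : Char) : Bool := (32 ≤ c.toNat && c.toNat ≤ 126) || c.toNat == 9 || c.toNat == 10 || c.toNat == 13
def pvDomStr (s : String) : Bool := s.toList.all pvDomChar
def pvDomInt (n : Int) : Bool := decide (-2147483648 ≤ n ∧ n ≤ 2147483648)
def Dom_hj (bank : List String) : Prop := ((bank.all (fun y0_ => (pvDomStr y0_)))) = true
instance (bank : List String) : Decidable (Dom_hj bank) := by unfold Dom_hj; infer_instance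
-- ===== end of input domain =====

-- B replaces A's monotonic stack by repeated leftmost-maximum scans over shrinking
-- windows (a different greedy decomposition, similar cost); same return value.

-- ===== PORT A =====
-- the 'while to_romove > 0 and stack and stack[-1] < cell' loop; stack is kept top-first
def hjPop (cell : String) : List String → Int → List String × Int
  | [], r => ([], r)
  | t :: rest, r => if 0 < r ∧ t < cell then hjPop cell rest (r - 1) else (t :: rest, r)

-- one iteration of A's 'for cell in bank' loop (pop phase, then append)
def hjStep (s : List String × Int) (cell : String) : List String × Int :=
  let p := hjPop cell s.1 s.2
  (cell :: p.1, p.2)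

def hj (bank : List String) : String :=
  -- stack[:k] with k = 12 ≥ 0 is take 12; the stack is kept top-first, so reverse to Python order
  PySem.Str.join "" ((bank.foldl hjStep ([], (bank.length : Int) - 12)).1.reverse.take 12)

-- ===== PORT B =====
-- _pick: index and value of the leftmost maximum of a (non-empty) window
def pickGo : Nat × String → Nat → List String → Nat × String
  | p, _, [] => p
  | p, j, x :: xs => if p.2 < x then pickGo (j, x) (j + 1) xs else pickGo p (j + 1) xs

def pick : List String → Nat × String
  | [] => (0, "")   -- unreachable: callers pass non-empty windows (Python would raise IndexError)
  | x :: xs => pickGo (0, x) 1 xs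

-- _build: pick the leftmost maximum of cells[:len-k+1], recurse on the suffix after it
def build (cells : List String) : Nat → List String
  | 0 => []
  | k + 1 =>
    let p := pick (cells.take (cells.length - (k + 1) + 1))
    p.2 :: build (cells.drop (p.1 + 1)) k

def hj_alt (bank : List String) : String :=
  PySem.Str.join "" (build bank (min bank.length 12))

-- ===== PRECONDITION & SPEC =====
def Spec_hj (bank : List String) (out : String) : Prop := out = hj_alt bank
instance (bank : List String) (out : String) : Decidable (Spec_hj bank out) := by unfold Spec_hj; infer_instance

-- ===== CLAIM (what is proved, stated in full; the proofs are below) =====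
def Claim_equal_hj : Prop := ∀ (bank : List String), Dom_hj bank → Spec_hj bank (hj bank)

-- ===== LEMMAS AND PROOFS =====

theorem pickGo_no (p : Nat × String) (j : Nat) (l : List String)
    (h : ∀ x ∈ l, ¬ p.2 < x) : pickGo p j l = p := by
  induction l generalizing p j with
  | nil => rfl
  | cons x xs ih =>
    simp only [pickGo]
    rw [if_neg (h x (by simp))]
    exact ih p (j + 1) (fun y hy => h y (by simp [hy]))

theorem pickGo_find (pre : List String) (p : Nat × String) (j : Nat) (m : String)
    (post : List String) (hpm : p.2 < m) (hpre : ∀ x ∈ pre, x < m)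
    (hpost : ∀ y ∈ post, y ≤ m) :
    pickGo p j (pre ++ m :: post) = (j + pre.length, m) := by
  induction pre generalizing p j with
  | nil =>
    simp only [List.nil_append, pickGo, hpm, if_pos]
    rw [pickGo_no (j, m) (j + 1) post (fun y hy => not_lt.mpr (hpost y hy))]
    simp
  | cons x pre' ih =>
    simp only [List.cons_append, pickGo]
    have hx : x < m := hpre x (by simp)
    have hpre' : ∀ y ∈ pre', y < m := fun y hy => hpre y (by simp [hy])
    by_cases hc : p.2 < x
    · rw [if_pos hc, ih (j, x) (j + 1) hx hpre']
      simp; omega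
    · rw [if_neg hc, ih p (j + 1) hpm hpre']
      simp; omega

theorem pick_eq (pre : List String) (m : String) (post : List String)
    (hpre : ∀ x ∈ pre, x < m) (hpost : ∀ y ∈ post, y ≤ m) :
    pick (pre ++ m :: post) = (pre.length, m) := by
  cases pre with
  | nil =>
    simp only [List.nil_append, pick]
    rw [pickGo_no (0, m) 1 post (fun y hy => not_lt.mpr (hpost y hy))]
    simp
  | cons x pre' =>
    simp only [List.cons_append, pick]
    rw [pickGo_find pre' (0, x) 1 m post (hpre x (by simp))
        (fun y hy => hpre y (by simp [hy])) hpost]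
    simp; omega

theorem exists_leftmost (w : List String) (hw : w ≠ []) :
    ∃ pre m post, w = pre ++ m :: post ∧ (∀ x ∈ pre, x < m) ∧ (∀ y ∈ post, y ≤ m) := by
  induction w with
  | nil => exact absurd rfl hw
  | cons x xs ih =>
    cases xs with
    | nil => exact ⟨[], x, [], by simp, by simp, by simp⟩
    | cons y ys =>
      obtain ⟨pre, m, post, heq, hpre, hpost⟩ := ih (by simp)
      by_cases hx : x < m
      · refine ⟨x :: pre, m, post, by simp [heq], ?_, hpost⟩
        intro z hz
        rcases List.mem_cons.mp hz with h | h
        · exact h ▸ hx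
        · exact hpre z h
      · refine ⟨[], x, y :: ys, by simp, by simp, ?_⟩
        intro z hz
        rw [heq] at hz
        rcases List.mem_append.mp hz with h | h
        · exact le_of_lt (lt_of_lt_of_le (hpre z h) (not_lt.mp hx))
        · rcases List.mem_cons.mp h with h' | h'
          · exact h' ▸ not_lt.mp hx
          · exact le_trans (hpost z h') (not_lt.mp hx)

theorem pop_nonpos (cell : String) (st : List String) (r : Int) (hr : r ≤ 0) :
    hjPop cell st r = (st, r) := by
  cases st with
  | nil => rfl
  | cons t rest =>
    simp only [hjPop]
    rw [if_neg (by rintro ⟨h1, _⟩; omega)]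

theorem foldl_nopop (cells : List String) (st : List String) (r : Int) (hr : r ≤ 0) :
    List.foldl hjStep (st, r) cells = (cells.reverse ++ st, r) := by
  induction cells generalizing st with
  | nil => simp
  | cons c cs ih =>
    simp only [List.foldl_cons, hjStep, pop_nonpos c st r hr]
    rw [ih (c :: st)]
    simp

theorem pop_clear (cell : String) (st : List String) (r : Int)
    (h : ∀ x ∈ st, x < cell) (hlen : (st.length : Int) ≤ r) :
    hjPop cell st r = ([], r - st.length) := by
  induction st generalizing r with
  | nil => simp [hjPop]
  | cons t rest ih =>
    simp only [hjPop]
    rw [if_pos ⟨by simp at hlen; omega, h t (by simp)⟩]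
    rw [ih (r - 1) (fun x hx => h x (by simp [hx])) (by simp at hlen ⊢; omega)]
    simp only [List.length_cons]
    congr 1
    push_cast
    ring

theorem pop_diff (cell : String) (st : List String) (r : Int) :
    (hjPop cell st r).2 - ((hjPop cell st r).1.length : Int) = r - st.length := by
  induction st generalizing r with
  | nil => simp [hjPop]
  | cons t rest ih =>
    simp only [hjPop]
    by_cases hc : 0 < r ∧ t < cell
    · rw [if_pos hc]; have := ih (r - 1); simp at this ⊢; omega
    · rw [if_neg hc]

theorem pop_mem (cell : String) (st : List String) (r : Int) (x : String)
    (hx : x ∈ (hjPop cell st r).1) : x ∈ st := by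
  induction st generalizing r with
  | nil => simp [hjPop] at hx
  | cons t rest ih =>
    simp only [hjPop] at hx
    by_cases hc : 0 < r ∧ t < cell
    · rw [if_pos hc] at hx; exact List.mem_cons_of_mem t (ih (r - 1) hx)
    · rw [if_neg hc] at hx; exact hx

theorem foldl_mem (cells : List String) (st : List String) (r : Int) (x : String)
    (hx : x ∈ (List.foldl hjStep (st, r) cells).1) : x ∈ st ∨ x ∈ cells := by
  induction cells generalizing st r with
  | nil => exact Or.inl (by simpa using hx)
  | cons c cs ih =>
    simp only [List.foldl_cons, hjStep] at hx
    rcases ih _ _ hx with h | h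
    · rcases List.mem_cons.mp h with h' | h'
      · exact Or.inr (by simp [h'])
      · exact Or.inl (pop_mem c st r x h')
    · exact Or.inr (by simp [h])

theorem foldl_mu (cells : List String) (st : List String) (r : Int) :
    (List.foldl hjStep (st, r) cells).2 - ((List.foldl hjStep (st, r) cells).1.length : Int)
      = r - st.length - cells.length := by
  induction cells generalizing st r with
  | nil => simp
  | cons c cs ih =>
    simp only [List.foldl_cons, hjStep]
    rw [ih]
    have := pop_diff c st r
    simp at this ⊢; omega

theorem pop_append (cell m : String) (st : List String) (r : Int)
    (h : 0 < r - (st.length : Int) → cell ≤ m) :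
    hjPop cell (st ++ [m]) r = ((hjPop cell st r).1 ++ [m], (hjPop cell st r).2) := by
  induction st generalizing r with
  | nil =>
    simp only [List.nil_append, hjPop]
    have hcond : ¬ (0 < r ∧ m < cell) := by
      rintro ⟨hr, hm⟩
      have hle : cell ≤ m := h (by simpa using hr)
      exact absurd hm (not_lt.mpr hle)
    rw [if_neg hcond]
  | cons t rest ih =>
    simp only [List.cons_append, hjPop]
    by_cases hc : 0 < r ∧ t < cell
    · rw [if_pos hc, if_pos hc, ih (r - 1) (by intro h'; exact h (by simp at h' ⊢; omega))]
    · rw [if_neg hc, if_neg hc]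
      simp

theorem foldl_bottom (cells : List String) (st : List String) (r : Int) (m : String)
    (h : ∀ (j : Nat) (hj : j < cells.length), (j : Int) < r - st.length → cells[j] ≤ m) :
    List.foldl hjStep (st ++ [m], r) cells =
      ((List.foldl hjStep (st, r) cells).1 ++ [m], (List.foldl hjStep (st, r) cells).2) := by
  induction cells generalizing st r with
  | nil => simp
  | cons c cs ih =>
    simp only [List.foldl_cons, hjStep]
    rw [pop_append c m st r (fun hr => h 0 (by simp) (by simpa using hr))]
    have hmu := pop_diff c st r
    have : (c :: (hjPop c st r).1) ++ [m] = c :: ((hjPop c st r).1 ++ [m]) := by simp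
    rw [← this, ih (c :: (hjPop c st r).1) (hjPop c st r).2]
    intro j hjlt hjr
    have := h (j + 1) (by simpa using Nat.succ_lt_succ hjlt) (by simp at hjr ⊢; omega)
    simpa using this

theorem main_lemma (k : Nat) (cells : List String) (hk : k ≤ cells.length) :
    (List.foldl hjStep ([], (cells.length : Int) - k) cells).1.reverse.take k
      = build cells k := by
  induction k generalizing cells with
  | zero => simp [build]
  | succ k ih =>
    have hn : 1 ≤ cells.length := le_trans (Nat.succ_le_succ (Nat.zero_le k)) hk
    push_cast
    set n := cells.length with hn_def
    set b : Nat := n - (k + 1) with hb_def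
    clear_value n b
    have hwlen : (cells.take (b + 1)).length = b + 1 := by
      simp; omega
    have hwne : cells.take (b + 1) ≠ [] := by
      intro h
      rw [h] at hwlen
      simp at hwlen
    obtain ⟨pre, m, post, hw, hpre, hpost⟩ := exists_leftmost _ hwne
    have hsplit : pre.length + 1 + post.length = b + 1 := by
      have := congrArg List.length hw
      simp [hwlen] at this; omega
    have hidx : pre.length ≤ b := by omega
    have hcells : cells = pre ++ m :: (post ++ cells.drop (b + 1)) := by
      conv_lhs => rw [← List.take_append_drop (b + 1) cells]
      rw [hw]; simp
    set rest := post ++ cells.drop (b + 1) with hrest_def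
    have hrestlen : rest.length = n - pre.length - 1 := by
      have := congrArg List.length hcells
      simp at this; omega
    -- phase 1: fold over pre
    set q := List.foldl hjStep ([], (n : Int) - (k + 1)) pre with hq_def
    have hqmem : ∀ x ∈ q.1, x < m := by
      intro x hx
      rcases foldl_mem pre [] _ x hx with h | h
      · simp at h
      · exact hpre x h
    have hqmu : q.2 - (q.1.length : Int) = (n : Int) - (k + 1) - pre.length := by
      have := foldl_mu pre [] ((n : Int) - (k + 1)); simpa using this
    have hblez : ((b : Int)) = (n : Int) - (k + 1) := by omega
    -- phase 2: the step on m clears the stack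
    have hclear : hjPop m q.1 q.2 = ([], (b : Int) - pre.length) := by
      rw [pop_clear m q.1 q.2 hqmem (by omega)]
      congr 1; omega
    -- phase 3: fold over rest with m at the bottom
    have hbot : List.foldl hjStep ([m], (b : Int) - pre.length) rest =
        ((List.foldl hjStep ([], (b : Int) - pre.length) rest).1 ++ [m],
         (List.foldl hjStep ([], (b : Int) - pre.length) rest).2) := by
      have := foldl_bottom rest [] ((b : Int) - pre.length) m ?_
      · simpa using this
      · intro j hjlt hjr
        have hjpost : j < post.length := by simp at hjr; omega
        have hg : rest[j] = post[j]'hjpost := List.getElem_append_left hjpost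
        rw [hg]
        exact hpost _ (List.getElem_mem hjpost)
    -- assemble the fold over cells
    have hfold : List.foldl hjStep ([], (n : Int) - (k + 1)) cells =
        ((List.foldl hjStep ([], (b : Int) - pre.length) rest).1 ++ [m],
         (List.foldl hjStep ([], (b : Int) - pre.length) rest).2) := by
      conv_lhs => rw [hcells]
      rw [List.foldl_append, ← hq_def, List.foldl_cons]
      show List.foldl hjStep (hjStep q m) rest = _
      rw [show hjStep q m = ([m], (b : Int) - pre.length) by
        simp only [hjStep, hclear]]
      exact hbot
    rw [hfold]
    -- LHS becomes m :: take k (...)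
    have hrest_k : k ≤ rest.length := by omega
    have hrest_budget : ((rest.length : Int) - k) = (b : Int) - pre.length := by
      rw [hrestlen]; omega
    have ihr := ih rest hrest_k
    rw [hrest_budget] at ihr
    -- RHS
    have hpick : pick (cells.take (b + 1)) = (pre.length, m) := by
      rw [hw]; exact pick_eq pre m post hpre hpost
    have hdrop : cells.drop (pre.length + 1) = rest := by
      rw [hcells, show pre ++ m :: rest = (pre ++ [m]) ++ rest by simp,
        show pre.length + 1 = (pre ++ [m]).length by simp]
      exact List.drop_left
    show _ = build cells (k + 1)
    simp only [build, ← hn_def]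
    rw [show n - (k + 1) + 1 = b + 1 by omega, hpick]
    simp only [hdrop]
    rw [List.reverse_append]
    simp only [List.reverse_cons, List.reverse_nil, List.nil_append, List.cons_append,
      List.take_succ_cons]
    rw [ihr]

-- ===== VERDICT (by name: the statement is the Claim_ definition above) =====
theorem hj_spec : Claim_equal_hj := by
  intro bank _
  show hj bank = hj_alt bank
  unfold hj hj_alt
  by_cases h12 : 12 ≤ bank.length
  · rw [show min bank.length 12 = 12 by omega]
    have h0 := main_lemma 12 bank h12
    simp only [Nat.cast_ofNat] at h0
    rw [h0]
  · rw [show min bank.length 12 = bank.length by omega]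
    have hbuild : build bank bank.length = bank := by
      have h0 := main_lemma bank.length bank le_rfl
      rw [foldl_nopop bank [] _ (by omega)] at h0
      simpa using h0.symm
    rw [hbuild, foldl_nopop bank [] _ (by omega : (bank.length : Int) - 12 ≤ 0)]
    simp [List.take_of_length_le (by omega : bank.length ≤ 12)]
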